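-- pv_equiv track=rewrite | github.com/elsid/master | src/match_pattern/pattern_matcher/match.py | eq_ignore_order
-- ===== SOURCE A (Python) =====
-- def eq_ignore_order(first, second):
--
--     def is_list(value):
--         return isinstance(value, list)
--
--     used = set()
--     if len(first) != len(second):
--         return False
--
--     def find_eq(first_value):
--
--         def can_be_used(index, value):
--             return (index not in used
--                     and (eq_ignore_order(first_value, value)
--                          if is_list(value) else first_value == value))
--
--         for second_index, second_value in enumerate(second):
--             if can_be_used(second_index, second_value):
--                 used.add(second_index)
--                 return True
--
--     for x in first:
--         if not find_eq(x):
--             return False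
--     return True
-- ===== SOURCE B (Python) =====
-- def eq_ignore_order(first, second):
--     # Multiset comparison by sorting instead of A's quadratic greedy matching
--     # (for the flat lists of integers this task's claim covers).
--     return sorted(first) == sorted(second)
-- ===== Notes on version B (the rewrite author's own statement) =====
-- stated objective: faster
-- what changed: A greedily matches each element of first against yet-unused indices of second (a linear scan per element); B sorts both lists and compares them, deciding the same multiset equality.
import Mathlib
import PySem

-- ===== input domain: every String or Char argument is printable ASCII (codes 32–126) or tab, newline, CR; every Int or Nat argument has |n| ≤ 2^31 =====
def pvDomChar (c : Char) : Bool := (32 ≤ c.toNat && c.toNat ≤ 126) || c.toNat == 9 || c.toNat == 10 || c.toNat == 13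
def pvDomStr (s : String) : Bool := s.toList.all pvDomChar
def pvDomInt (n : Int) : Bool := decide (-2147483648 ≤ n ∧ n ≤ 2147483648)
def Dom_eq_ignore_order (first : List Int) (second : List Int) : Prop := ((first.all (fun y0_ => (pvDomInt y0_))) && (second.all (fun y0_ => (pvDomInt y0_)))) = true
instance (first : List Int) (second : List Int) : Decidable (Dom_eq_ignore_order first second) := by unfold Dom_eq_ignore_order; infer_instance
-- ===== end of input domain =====

-- B replaces A's quadratic greedy index-matching with sort-both-and-compare (same multiset
-- equality on the flat integer lists this claim covers); measured faster asymptotically.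

-- ===== PORT A =====
-- find_eq's scan over enumerate(second): first index not in `used` whose value equals v
def pvFindEq (second_en : List (Int × Int)) (used : PySem.Set Int) (v : Int) : Option Int :=
  match second_en with
  | [] => none
  | (i, y) :: rest =>
    if !(PySem.Set.contains used i) && (v == y) then some i
    else pvFindEq rest used v

-- the `for x in first` loop, threading the `used` set
def pvLoopA (second_en : List (Int × Int)) (first : List Int) (used : PySem.Set Int) : Bool :=
  match first with
  | [] => true
  | x :: xs =>
    match pvFindEq second_en used x with
    | some i => pvLoopA second_en xs (PySem.Set.add used i)
    | none => false

def eq_ignore_order (first : List Int) (second : List Int) : Bool :=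
  if first.length ≠ second.length then false
  else pvLoopA (PySem.List.enumerate second) first PySem.Set.empty

-- ===== PORT B =====
def eq_ignore_order_alt (first : List Int) (second : List Int) : Bool :=
  (PySem.List.sorted first (fun x => x)) == (PySem.List.sorted second (fun x => x))

-- ===== PRECONDITION & SPEC =====
def Spec_eq_ignore_order (first : List Int) (second : List Int) (out : Bool) : Prop := out = eq_ignore_order_alt first second
instance (first : List Int) (second : List Int) (out : Bool) : Decidable (Spec_eq_ignore_order first second out) := by unfold Spec_eq_ignore_order; infer_instance

-- ===== CLAIM (what is proved, stated in full; the proofs are below) =====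
def Claim_equal_eq_ignore_order : Prop := ∀ (first : List Int) (second : List Int), Dom_eq_ignore_order first second → Spec_eq_ignore_order first second (eq_ignore_order first second)

-- ===== LEMMAS AND PROOFS =====

-- the values of second at the indices not yet used, in order
def pvUnused (en : List (Int × Int)) (used : PySem.Set Int) : List Int :=
  (en.filter (fun p => !(PySem.Set.contains used p.1))).map Prod.snd

-- abstract model of A's loop: take each x from the remaining pool, or fail
def pvGreedy : List Int → List Int → Bool
  | [], _ => true
  | x :: xs, ys => if x ∈ ys then pvGreedy xs (ys.erase x) else false

lemma pv_contains_eq (s : PySem.Set Int) (i : Int) :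
    PySem.Set.contains s i = decide (i ∈ s) := by
  by_cases h : i ∈ s <;> simp [PySem.Set.contains, h]

lemma pvUnused_cons (i y : Int) (rest : List (Int × Int)) (used : PySem.Set Int) :
    pvUnused ((i, y) :: rest) used =
      if i ∈ used then pvUnused rest used else y :: pvUnused rest used := by
  simp only [pvUnused, List.filter_cons, pv_contains_eq]
  by_cases h : i ∈ used <;> simp [h]

lemma pvUnused_add_notkey (en : List (Int × Int)) (used : PySem.Set Int) (j : Int)
    (hj : ∀ p ∈ en, p.1 ≠ j) :
    pvUnused en (PySem.Set.add used j) = pvUnused en used := by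
  induction en with
  | nil => rfl
  | cons p rest ih =>
    obtain ⟨i, y⟩ := p
    have hp : i ≠ j := hj (i, y) List.mem_cons_self
    have ih' : pvUnused rest (PySem.Set.add used j) = pvUnused rest used :=
      ih (fun q hq => hj q (List.mem_cons_of_mem _ hq))
    have hmem : (i ∈ PySem.Set.add used j) ↔ i ∈ used := by
      rw [PySem.Set.mem_add]; simp [hp]
    rw [pvUnused_cons, pvUnused_cons, ih']
    by_cases h : i ∈ used
    · rw [if_pos (hmem.mpr h), if_pos h]
    · rw [if_neg (fun hm => h (hmem.mp hm)), if_neg h]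

lemma pvFindEq_some_key (en : List (Int × Int)) (used : PySem.Set Int) (v j : Int)
    (h : pvFindEq en used v = some j) :
    j ∉ used ∧ ∃ y, (j, y) ∈ en := by
  induction en with
  | nil => simp [pvFindEq] at h
  | cons p rest ih =>
    obtain ⟨i, y⟩ := p
    rw [pvFindEq] at h
    split at h
    · rename_i hc
      injection h with hij
      subst hij
      simp only [Bool.and_eq_true, Bool.not_eq_true', beq_iff_eq] at hc
      refine ⟨?_, y, List.mem_cons_self⟩
      intro hmem
      rw [pv_contains_eq] at hc
      simp [hmem] at hc
    · obtain ⟨h1, y', h2⟩ := ih h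
      exact ⟨h1, y', List.mem_cons_of_mem _ h2⟩

lemma pvFindEq_none (en : List (Int × Int)) (used : PySem.Set Int) (v : Int)
    (h : pvFindEq en used v = none) :
    v ∉ pvUnused en used := by
  induction en with
  | nil => simp [pvUnused]
  | cons p rest ih =>
    obtain ⟨i, y⟩ := p
    rw [pvFindEq] at h
    split at h
    · simp at h
    · rename_i hc
      rw [pvUnused_cons]
      by_cases hu : i ∈ used
      · rw [if_pos hu]; exact ih h
      · have hvy : v ≠ y := by
          intro he
          rw [pv_contains_eq] at hc
          simp [hu, he] at hc
        rw [if_neg hu]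
        simp only [List.mem_cons, not_or]
        exact ⟨hvy, ih h⟩

lemma pvFindEq_some_erase (en : List (Int × Int)) (used : PySem.Set Int) (v j : Int)
    (hn : en.Pairwise (fun p q => p.1 ≠ q.1))
    (h : pvFindEq en used v = some j) :
    v ∈ pvUnused en used ∧
      pvUnused en (PySem.Set.add used j) = (pvUnused en used).erase v := by
  induction en with
  | nil => simp [pvFindEq] at h
  | cons p rest ih =>
    obtain ⟨i, y⟩ := p
    rw [List.pairwise_cons] at hn
    obtain ⟨hhead, hrest⟩ := hn
    rw [pvFindEq] at h
    split at h
    · rename_i hc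
      injection h with hij
      subst hij
      simp only [Bool.and_eq_true, Bool.not_eq_true', beq_iff_eq] at hc
      obtain ⟨hcu, hvy⟩ := hc
      subst hvy
      have hu : i ∉ used := by
        intro hmem; rw [pv_contains_eq] at hcu; simp [hmem] at hcu
      have hiadd : i ∈ PySem.Set.add used i := by rw [PySem.Set.mem_add]; right; rfl
      have htail : pvUnused rest (PySem.Set.add used i) = pvUnused rest used :=
        pvUnused_add_notkey rest used i (fun q hq => (hhead q hq).symm)
      constructor
      · rw [pvUnused_cons, if_neg hu]; exact List.mem_cons_self
      · rw [pvUnused_cons, pvUnused_cons, if_pos hiadd, if_neg hu, htail,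
          List.erase_cons_head]
    · rename_i hc
      obtain ⟨hjnu, y', hjmem⟩ := pvFindEq_some_key rest used v j h
      have hij : i ≠ j := hhead (j, y') hjmem
      obtain ⟨hv, htl⟩ := ih hrest h
      rw [pvUnused_cons, pvUnused_cons]
      by_cases hu : i ∈ used
      · have hadd : i ∈ PySem.Set.add used j := by rw [PySem.Set.mem_add]; left; exact hu
        rw [if_pos hu, if_pos hadd]
        exact ⟨hv, htl⟩
      · have hvy : v ≠ y := by
          intro he
          rw [pv_contains_eq] at hc
          simp [hu, he] at hc
        have hadd : i ∉ PySem.Set.add used j := by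
          rw [PySem.Set.mem_add]
          rintro (h' | h')
          · exact hu h'
          · exact hij h'
        rw [if_neg hu, if_neg hadd]
        refine ⟨List.mem_cons_of_mem y hv, ?_⟩
        rw [List.erase_cons_tail (by simpa using Ne.symm hvy), htl]

lemma pvLoopA_eq_greedy (en : List (Int × Int)) (first : List Int) (used : PySem.Set Int)
    (hn : en.Pairwise (fun p q => p.1 ≠ q.1)) :
    pvLoopA en first used = pvGreedy first (pvUnused en used) := by
  induction first generalizing used with
  | nil => rfl
  | cons x xs ih =>
    rw [pvLoopA, pvGreedy]
    cases hf : pvFindEq en used x with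
    | none =>
      have := pvFindEq_none en used x hf
      simp [this]
    | some j =>
      obtain ⟨hv, htl⟩ := pvFindEq_some_erase en used x j hn hf
      have hred : (match some j with
          | some i => pvLoopA en xs (PySem.Set.add used i)
          | none => false) = pvLoopA en xs (PySem.Set.add used j) := rfl
      rw [hred, if_pos hv, ih (PySem.Set.add used j), htl]

lemma pv_not_mem_empty (i : Int) : i ∉ (PySem.Set.empty : PySem.Set Int) := by
  simp [PySem.Set.empty]

lemma pvUnused_enumerate (second : List Int) :
    ∀ s : Int, pvUnused (PySem.List.enumerate second s) PySem.Set.empty = second := by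
  induction second with
  | nil => intro s; simp [PySem.List.enumerate_nil, pvUnused]
  | cons x xs ih =>
    intro s
    rw [PySem.List.enumerate_cons, pvUnused_cons, if_neg (pv_not_mem_empty s), ih (s + 1)]

lemma pvGreedy_iff_count (xs : List Int) :
    ∀ ys : List Int, pvGreedy xs ys = true ↔ ∀ v, xs.count v ≤ ys.count v := by
  induction xs with
  | nil => intro ys; simp [pvGreedy]
  | cons x xs ih =>
    intro ys
    rw [pvGreedy]
    by_cases hx : x ∈ ys
    · rw [if_pos hx, ih]
      constructor
      · intro h v
        have hv := h v
        have hxc : 0 < ys.count x := List.count_pos_iff.mpr hx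
        rw [List.count_erase] at hv
        rw [List.count_cons]
        by_cases hvx : v = x
        · subst hvx
          simp at hv ⊢
          omega
        · simp [Ne.symm hvx] at hv ⊢
          omega
      · intro h v
        have hv := h v
        rw [List.count_cons] at hv
        rw [List.count_erase]
        by_cases hvx : v = x
        · subst hvx
          simp at hv ⊢
          omega
        · simp [Ne.symm hvx] at hv ⊢
          omega
    · rw [if_neg hx]
      have h0 : ys.count x = 0 := List.count_eq_zero_of_not_mem hx
      have h1 : (x :: xs).count x = xs.count x + 1 := by simp
      constructor
      · intro h; simp at h
      · intro h
        have hx' := h x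
        omega

lemma pv_A_iff (first second : List Int) :
    eq_ignore_order first second = true ↔ first.Perm second := by
  rw [eq_ignore_order]
  by_cases hlen : first.length = second.length
  · rw [if_neg (by simpa using hlen)]
    have hpw : (PySem.List.enumerate second).Pairwise (fun p q => p.1 ≠ q.1) :=
      (PySem.List.pairwise_lt_enumerate second 0).imp (fun h => ne_of_lt h)
    rw [pvLoopA_eq_greedy _ _ _ hpw, pvUnused_enumerate second 0, pvGreedy_iff_count]
    constructor
    · intro h
      have hsub : first.Subperm second :=
        List.subperm_ext_iff.mpr (fun v _ => h v)
      exact hsub.perm_of_length_le (le_of_eq hlen.symm)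
    · intro h v
      rw [h.count_eq]
  · rw [if_pos (by simpa using hlen)]
    constructor
    · intro h; exact absurd h (by simp)
    · intro h; exact absurd h.length_eq hlen

lemma pv_main (first second : List Int) :
    eq_ignore_order first second = eq_ignore_order_alt first second := by
  have halt : eq_ignore_order_alt first second = true ↔ first.Perm second := by
    rw [eq_ignore_order_alt, beq_iff_eq]
    exact PySem.List.sorted_id_eq_sorted_id_iff_perm first second
  have ha := pv_A_iff first second
  cases h1 : eq_ignore_order first second <;> cases h2 : eq_ignore_order_alt first second
  · rfl
  · exact absurd (ha.mpr (halt.mp h2)) (by simp [h1])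
  · exact absurd (halt.mpr (ha.mp h1)) (by simp [h2])
  · rfl

-- ===== VERDICT (by name: the statement is the Claim_ definition above) =====
theorem eq_ignore_order_spec : Claim_equal_eq_ignore_order := by
  intro first second _
  unfold Spec_eq_ignore_order
  exact pv_main first second
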